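-- pv_equiv track=rewrite | github.com/sajjadium/ctf-archives | ctfs/WxMCTF/2023/crypto/maze/maze_zS72xsE.py | generateMaze
-- ===== SOURCE A (Python) =====
-- class PRNG:
--     def __init__(self, seed):
--         self.state = seed
--         self.mul = 25214903917
--         self.add = 11
--         self.mod = 1 << 48
--
--     def next(self):
--         self.state = (self.mul * self.state + self.add) % self.mod
--         return (self.state >> 17) % 6
--
-- def generateMaze(seed):
--     maze = []
--     prng = PRNG(seed)
--     for _ in range(144):
--         maze.append(prng.next())
--     maze = [maze[i:i + 12] for i in range(0, 144, 12)]
--     for i in range(12):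
--         for j in range(12):
--             if maze[i][j]:
--                 maze[i][j] = "0"
--             else:
--                 maze[i][j] = " "
--     maze[0][0] = "@"
--     maze[11][11] = "X"
--     return maze
-- ===== SOURCE B (Python) =====
-- def generateMaze(seed):
--     # Jump-ahead LCG: the state after k steps has the closed form
--     # a^k*seed + c*(a^k-1)/(a-1) modulo m, so every cell is computed
--     # independently by modular exponentiation instead of iterating the recurrence.
--     a, c, m = 25214903917, 11, 1 << 48
--     def draw(k):  # value returned by the k-th call to prng.next()
--         geo = (pow(a, k, (a - 1) * m) - 1) // (a - 1)  # (a^k-1)/(a-1) mod m, exact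
--         state = (pow(a, k, m) * seed + c * geo) % m
--         return (state >> 17) % 6
--     grid = [["0" if draw(12 * i + j + 1) else " " for j in range(12)]
--             for i in range(12)]
--     grid[0][0] = "@"
--     grid[11][11] = "X"
--     return grid
-- ===== Notes on version B (the rewrite author's own statement) =====
-- stated objective: alternative
-- what changed: B discards the sequential step-by-step LCG recurrence and computes every cell independently from the jump-ahead closed form state_k = a^k*seed + c*(a^k-1)/(a-1) modulo the LCG modulus, evaluated with Python's three-argument pow (random access to the PRNG stream instead of iterating it).
import Mathlib
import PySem

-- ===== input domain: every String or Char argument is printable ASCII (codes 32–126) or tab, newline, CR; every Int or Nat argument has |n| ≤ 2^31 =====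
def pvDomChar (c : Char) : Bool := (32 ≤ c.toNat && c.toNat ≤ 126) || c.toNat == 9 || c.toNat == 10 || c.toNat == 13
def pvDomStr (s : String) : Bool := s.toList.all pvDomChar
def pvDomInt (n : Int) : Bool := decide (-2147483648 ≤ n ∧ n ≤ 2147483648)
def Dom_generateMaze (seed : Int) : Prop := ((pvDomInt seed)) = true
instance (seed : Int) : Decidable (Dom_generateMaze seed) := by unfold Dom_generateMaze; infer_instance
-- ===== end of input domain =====

-- B replaces A's sequential step-by-step LCG recurrence by the jump-ahead closed form
-- state_k = a^k*seed + c*(a^k-1)/(a-1) modulo the LCG modulus, computing every cell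
-- independently by modular exponentiation; objective: alternative.

-- ===== PORT A =====
-- PRNG.next: mutates state, returns (state >> 17) % 6; ported as state-passing pair.
def pvPrngNext (s : Int) : Int × Int :=
  let s' := PySem.Int.mod (25214903917 * s + 11) 281474976710656
  (s', PySem.Int.mod (PySem.Int.floordiv s' 131072) 6)

-- body of "for _ in range(144): maze.append(prng.next())"
def pvStepA (st : Int × List Int) (_ : Nat) : Int × List Int :=
  let p := pvPrngNext st.1
  (p.1, st.2 ++ [p.2])

def generateMaze (seed : Int) : List (List String) :=
  let gen := (List.range 144).foldl pvStepA (seed, [])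
  -- maze = [maze[i:i+12] for i in range(0, 144, 12)]
  let chunks := (PySem.List.pyRange 0 144 12).map
      (fun i => PySem.List.slice gen.2 (some i) (some (i + 12)))
  -- the nested loop rewrites every cell in place (int -> str); ported as a map over the same cells
  let conv := chunks.map (fun row => row.map (fun v => if v ≠ 0 then "0" else " "))
  let m1 := conv.set 0 ((conv.getD 0 []).set 0 "@")
  m1.set 11 ((m1.getD 11 []).set 11 "X")

-- ===== PORT B =====
-- Source B's draw(k): the k-th PRNG value from the closed form, via pow(a, k, ·)
def pvDraw (seed : Int) (k : Nat) : Int :=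
  let a : Int := 25214903917
  let c : Int := 11
  let m : Int := 281474976710656
  let geo := PySem.Int.floordiv (PySem.Int.powMod a k ((a - 1) * m) - 1) (a - 1)
  let state := PySem.Int.mod (PySem.Int.powMod a k m * seed + c * geo) m
  PySem.Int.mod (PySem.Int.floordiv state 131072) 6

def generateMaze_alt (seed : Int) : List (List String) :=
  let grid := (List.range 12).map (fun i =>
      (List.range 12).map (fun j =>
        if pvDraw seed (12 * i + j + 1) ≠ 0 then "0" else " "))
  let g1 := grid.set 0 ((grid.getD 0 []).set 0 "@")
  g1.set 11 ((g1.getD 11 []).set 11 "X")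

-- ===== PRECONDITION & SPEC =====
def Spec_generateMaze (seed : Int) (out : List (List String)) : Prop := out = generateMaze_alt seed
instance (seed : Int) (out : List (List String)) : Decidable (Spec_generateMaze seed out) := by unfold Spec_generateMaze; infer_instance

-- ===== CLAIM (what is proved, stated in full; the proofs are below) =====
def Claim_equal_generateMaze : Prop := ∀ (seed : Int), Dom_generateMaze seed → Spec_generateMaze seed (generateMaze seed)

-- ===== LEMMAS AND PROOFS =====
-- state after n draws / the list of the n values drawn
def pvStateN (s : Int) : Nat → Int
  | 0 => s
  | n+1 => (pvPrngNext (pvStateN s n)).1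

def pvFlatGen (s : Int) : Nat → List Int
  | 0 => []
  | n+1 => pvFlatGen s n ++ [(pvPrngNext (pvStateN s n)).2]

-- geometric accumulator: G (n+1) = a*G n + 1, so (a-1)*G n = a^n - 1
def pvG : Nat → Int
  | 0 => 0
  | n+1 => 25214903917 * pvG n + 1

theorem pvFlatGen_length (s : Int) (n : Nat) : (pvFlatGen s n).length = n := by
  induction n with
  | zero => rfl
  | succ n ih => simp [pvFlatGen, ih]

theorem pvStateN_add (s : Int) (a b : Nat) :
    pvStateN s (a + b) = pvStateN (pvStateN s a) b := by
  induction b with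
  | zero => rfl
  | succ b ih => rw [Nat.add_succ]; simp only [pvStateN, ih]

theorem pvFlatGen_add (s : Int) (a b : Nat) :
    pvFlatGen s (a + b) = pvFlatGen s a ++ pvFlatGen (pvStateN s a) b := by
  induction b with
  | zero => simp [pvFlatGen]
  | succ b ih => rw [Nat.add_succ]; simp only [pvFlatGen, ih, pvStateN_add, List.append_assoc]

theorem pv_foldA (n : Nat) (s : Int) (l : List Int) :
    (List.range n).foldl pvStepA (s, l) = (pvStateN s n, l ++ pvFlatGen s n) := by
  induction n with
  | zero => simp [pvStateN, pvFlatGen]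
  | succ n ih =>
    rw [List.range_succ, List.foldl_append, ih]
    simp [pvStepA, pvStateN, pvFlatGen]

theorem pv_chunk (s : Int) (a b c : Nat) :
    ((pvFlatGen s (a + b + c)).drop a).take b = pvFlatGen (pvStateN s a) b := by
  rw [pvFlatGen_add s (a + b) c, pvFlatGen_add s a b, pvStateN_add, List.append_assoc]
  rw [List.drop_left' (pvFlatGen_length s a), List.take_left' (pvFlatGen_length _ b)]

theorem pvFlatGen_eq_map (s : Int) (n : Nat) :
    pvFlatGen s n = (List.range n).map (fun t => (pvPrngNext (pvStateN s t)).2) := by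
  induction n with
  | zero => rfl
  | succ n ih => rw [pvFlatGen, ih, List.range_succ, List.map_append]; rfl

theorem pvG_mul (n : Nat) : 25214903916 * pvG n = 25214903917 ^ n - 1 := by
  induction n with
  | zero => simp [pvG]
  | succ n ih =>
    rw [pvG, pow_succ]
    nlinarith [ih]

-- closed form for the state after n+1 steps
theorem pvStateN_closed (s : Int) (n : Nat) :
    pvStateN s (n + 1) = (25214903917 ^ (n + 1) * s + 11 * pvG (n + 1)) % 281474976710656 := by
  induction n with
  | zero =>
    simp only [pvStateN, pvPrngNext, pvG,
      PySem.Int.mod_eq_emod_of_pos (show (0:Int) < 281474976710656 by norm_num)]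
    ring_nf
  | succ n ih =>
    show (pvPrngNext (pvStateN s (n + 1))).1 = _
    rw [ih]
    simp only [pvPrngNext,
      PySem.Int.mod_eq_emod_of_pos (show (0:Int) < 281474976710656 by norm_num)]
    rw [Int.add_emod (25214903917 * _), Int.mul_emod 25214903917,
      Int.emod_emod_of_dvd _ (dvd_refl (281474976710656 : Int)),
      ← Int.mul_emod, ← Int.add_emod]
    congr 1
    conv_rhs => rw [pvG, pow_succ]
    ring

-- generic modular step: reduced multiplier and reduced geometric sum do not change the residue
theorem pv_mod_affine (P s Y M q : Int) :
    (P % M * s + 11 * (Y - M * q)) % M = (P * s + 11 * Y) % M := by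
  have h1 : P % M * s + 11 * (Y - M * q) = P * s + 11 * Y - M * (P / M * s + 11 * q) := by
    rw [Int.emod_def]; ring
  rw [h1, Int.sub_emod, Int.mul_emod_right, sub_zero, Int.emod_emod_of_dvd _ (dvd_refl M)]

-- the k-th closed-form draw is the k-th sequential draw
theorem pvDraw_eq (s : Int) (n : Nat) :
    pvDraw s (n + 1) = (pvPrngNext (pvStateN s n)).2 := by
  have hm : (0:Int) < 281474976710656 := by norm_num
  have hprod : (0:Int) < (25214903917 - 1) * 281474976710656 := by norm_num
  have hpow : (0:Int) ≤ 25214903917 ^ (n + 1) := by positivity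
  -- unfold both sides to % / ediv form
  show PySem.Int.mod (PySem.Int.floordiv
      (PySem.Int.mod (PySem.Int.powMod 25214903917 (n+1) 281474976710656 * s +
        11 * PySem.Int.floordiv (PySem.Int.powMod 25214903917 (n+1) ((25214903917 - 1) * 281474976710656) - 1) (25214903917 - 1))
        281474976710656) 131072) 6
    = PySem.Int.mod (PySem.Int.floordiv ((pvPrngNext (pvStateN s n)).1) 131072) 6
  have hstate : (pvPrngNext (pvStateN s n)).1 = pvStateN s (n + 1) := rfl
  rw [hstate, pvStateN_closed]
  congr 2
  -- it remains to show the two "state" values are equal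
  rw [PySem.Int.powMod_eq_emod _ _ hm, PySem.Int.powMod_eq_emod _ _ hprod,
    PySem.Int.mod_eq_emod_of_pos hm]
  -- geo = pvG (n+1) - m*q where q = a^(n+1) / ((a-1)*m)
  have hdecomp : (25214903917:Int) ^ (n + 1) % ((25214903917 - 1) * 281474976710656) - 1
      = (25214903917 - 1) * (pvG (n + 1) - 281474976710656 * (25214903917 ^ (n + 1) / ((25214903917 - 1) * 281474976710656))) := by
    have h1 := Int.emod_add_mul_ediv ((25214903917:Int) ^ (n + 1)) ((25214903917 - 1) * 281474976710656)
    have h2 := pvG_mul (n + 1)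
    nlinarith [h1, h2]
  rw [hdecomp, PySem.Int.floordiv_eq_ediv_of_pos (show (0:Int) < 25214903917 - 1 by norm_num),
    Int.mul_ediv_cancel_left _ (show (25214903917:Int) - 1 ≠ 0 by norm_num)]
  exact pv_mod_affine _ _ _ _ _

-- one row of B equals one chunk of A's flat list, converted
theorem pvRow_eq (s : Int) (i : Nat) :
    (List.range 12).map (fun j => if pvDraw s (12 * i + j + 1) ≠ 0 then "0" else " ")
      = (pvFlatGen (pvStateN s (12 * i)) 12).map (fun v => if v ≠ 0 then "0" else " ") := by
  rw [pvFlatGen_eq_map, List.map_map]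
  refine List.map_congr_left ?_
  intro j _
  show (if pvDraw s (12 * i + j + 1) ≠ 0 then "0" else " ") = _
  rw [pvDraw_eq, pvStateN_add]
  rfl

-- the whole 12x12 grid, before '@' and 'X' are written
theorem pv_grid_eq (seed : Int) :
    ((PySem.List.pyRange 0 144 12).map
        (fun i => PySem.List.slice (pvFlatGen seed 144) (some i) (some (i + 12)))).map
      (fun row => row.map (fun v => if v ≠ 0 then "0" else " "))
    = (List.range 12).map (fun i => (List.range 12).map (fun j =>
        if pvDraw seed (12 * i + j + 1) ≠ 0 then "0" else " ")) := by
  have hr : PySem.List.pyRange 0 144 12 = [0,12,24,36,48,60,72,84,96,108,120,132] := by decide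
  rw [hr, show (List.range 12) = [0,1,2,3,4,5,6,7,8,9,10,11] from by decide]
  simp only [List.map_cons, List.map_nil]
  have hs : ∀ (a : Nat), a + 12 ≤ 144 →
      PySem.List.slice (pvFlatGen seed 144) (some (a : Int)) (some ((a : Int) + 12)) =
        pvFlatGen (pvStateN seed a) 12 := by
    intro a ha
    have hcast : ((a : Int) + 12) = ((a + 12 : Nat) : Int) := by push_cast; ring
    rw [hcast, PySem.List.slice_natCast]
    have hc : a + 12 + (144 - (a + 12)) = 144 := by omega
    have hk := pv_chunk seed a 12 (144 - (a + 12))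
    rw [hc] at hk
    simpa using hk
  have e0 := hs 0 (by omega); have e1 := hs 12 (by omega); have e2 := hs 24 (by omega)
  have e3 := hs 36 (by omega); have e4 := hs 48 (by omega); have e5 := hs 60 (by omega)
  have e6 := hs 72 (by omega); have e7 := hs 84 (by omega); have e8 := hs 96 (by omega)
  have e9 := hs 108 (by omega); have e10 := hs 120 (by omega); have e11 := hs 132 (by omega)
  have p0 := pvRow_eq seed 0; have p1 := pvRow_eq seed 1; have p2 := pvRow_eq seed 2
  have p3 := pvRow_eq seed 3; have p4 := pvRow_eq seed 4; have p5 := pvRow_eq seed 5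
  have p6 := pvRow_eq seed 6; have p7 := pvRow_eq seed 7; have p8 := pvRow_eq seed 8
  have p9 := pvRow_eq seed 9; have p10 := pvRow_eq seed 10; have p11 := pvRow_eq seed 11
  rw [show (List.range 12) = [0,1,2,3,4,5,6,7,8,9,10,11] from by decide]
    at p0 p1 p2 p3 p4 p5 p6 p7 p8 p9 p10 p11
  simp only [List.map_cons, List.map_nil] at p0 p1 p2 p3 p4 p5 p6 p7 p8 p9 p10 p11
  norm_num at e0 e1 e2 e3 e4 e5 e6 e7 e8 e9 e10 e11 p0 p1 p2 p3 p4 p5 p6 p7 p8 p9 p10 p11 ⊢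
  rw [e0, e1, e2, e3, e4, e5, e6, e7, e8, e9, e10, e11,
    ← p0, ← p1, ← p2, ← p3, ← p4, ← p5, ← p6, ← p7, ← p8, ← p9, ← p10, ← p11]
  exact ⟨rfl, rfl, rfl, rfl, rfl, rfl, rfl, rfl, rfl, rfl, rfl, rfl⟩

-- ===== VERDICT =====
theorem generateMaze_spec : Claim_equal_generateMaze := by
  intro seed _
  show generateMaze seed = generateMaze_alt seed
  simp only [generateMaze, generateMaze_alt, pv_foldA, List.nil_append]
  rw [pv_grid_eq]
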